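-- pv_equiv track=rewrite | github.com/jpurma/Kataja | kataja/shapes.py | adjusted_control_point_list
-- ===== SOURCE A (Python) =====
-- def adjusted_control_point_list(control_points, adjust):
--     """ List where control points and their adjustments are added up, and (x,y) tuples
--     are break down into one big list x1, y1, x2, y2,... to be used in path construction
--     :return: list
--     """
--     l = []
--     la = len(adjust)
--     for i, cp in enumerate(control_points):
--         if la <= i:
--             l.append(cp[0])
--             l.append(cp[1])
--         else:
--             l.append(cp[0] + adjust[i][0])
--             l.append(cp[1] + adjust[i][1])
--     return l
-- ===== SOURCE B (Python) =====
-- def adjusted_control_point_list(control_points, adjust):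
--     """ List where control points and their adjustments are added up, and (x,y) tuples
--     are break down into one big list x1, y1, x2, y2,... to be used in path construction
--     :return: list
--     """
--     flat = [c for cp in control_points for c in cp]
--     for i, (dx, dy) in enumerate(adjust[:len(control_points)]):
--         flat[2 * i] += dx
--         flat[2 * i + 1] += dy
--     return flat
-- ===== Notes on version B (the rewrite author's own statement) =====
-- stated objective: alternative
-- what changed: B first flattens all control points into one buffer in a single comprehension and then overlays the adjustments in a separate pass over adjust[:len(control_points)], instead of A's single loop that branches per control point on whether an adjustment exists.
import Mathlib
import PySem

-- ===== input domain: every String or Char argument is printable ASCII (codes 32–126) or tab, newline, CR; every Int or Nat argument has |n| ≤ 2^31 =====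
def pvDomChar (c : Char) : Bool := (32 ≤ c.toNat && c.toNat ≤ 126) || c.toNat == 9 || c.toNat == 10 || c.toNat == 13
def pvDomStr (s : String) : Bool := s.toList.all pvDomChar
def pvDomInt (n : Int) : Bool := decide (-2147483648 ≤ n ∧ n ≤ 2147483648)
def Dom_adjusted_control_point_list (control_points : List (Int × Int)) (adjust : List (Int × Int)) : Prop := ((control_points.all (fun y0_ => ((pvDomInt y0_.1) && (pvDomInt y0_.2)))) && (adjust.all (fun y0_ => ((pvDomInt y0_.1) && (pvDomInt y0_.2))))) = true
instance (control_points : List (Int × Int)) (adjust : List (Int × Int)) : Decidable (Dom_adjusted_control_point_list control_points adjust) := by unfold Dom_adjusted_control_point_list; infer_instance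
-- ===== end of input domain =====

-- B flattens the control points into one buffer first, then overlays the adjustments in a
-- separate pass (alternative decomposition, same O(n) cost); return value only, B mutates no input.


-- ===== PORT A =====
-- literal port of A: one loop over enumerate(control_points), branching on whether
-- an adjustment exists for index i (adjust[i] is ported as pyGetD; the guard ¬(la ≤ i)
-- together with i ≥ 0 from enumerate makes it exactly Python's adjust[i])
def adjusted_control_point_list (control_points : List (Int × Int)) (adjust : List (Int × Int)) : List Int :=
  (PySem.List.enumerate control_points).foldl
    (fun l p =>
      if (adjust.length : Int) ≤ p.1 then
        (l ++ [p.2.1]) ++ [p.2.2]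
      else
        (l ++ [p.2.1 + (PySem.List.pyGetD adjust p.1 (0, 0)).1]) ++
          [p.2.2 + (PySem.List.pyGetD adjust p.1 (0, 0)).2]) []

-- ===== PORT B =====
-- literal port of Source B: flatten once, then overlay adjust[:len(control_points)];
-- flat[2*i] += dx is ported as pyGetD/pySetD (indices are nonnegative and in range here)
def adjusted_control_point_list_alt (control_points : List (Int × Int)) (adjust : List (Int × Int)) : List Int :=
  let flat := control_points.flatMap (fun cp => [cp.1, cp.2])
  (PySem.List.enumerate (PySem.List.slice adjust none (some (control_points.length : Int)))).foldl
    (fun f p =>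
      let f1 := PySem.List.pySetD f (2 * p.1) (PySem.List.pyGetD f (2 * p.1) 0 + p.2.1)
      PySem.List.pySetD f1 (2 * p.1 + 1) (PySem.List.pyGetD f1 (2 * p.1 + 1) 0 + p.2.2)) flat

-- ===== PRECONDITION & SPEC =====
def Spec_adjusted_control_point_list (control_points : List (Int × Int)) (adjust : List (Int × Int)) (out : List Int) : Prop := out = adjusted_control_point_list_alt control_points adjust
instance (control_points : List (Int × Int)) (adjust : List (Int × Int)) (out : List Int) : Decidable (Spec_adjusted_control_point_list control_points adjust out) := by unfold Spec_adjusted_control_point_list; infer_instance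

-- ===== CLAIM (what is proved, stated in full; the proofs are below) =====
def Claim_equal_adjusted_control_point_list : Prop := ∀ (control_points : List (Int × Int)) (adjust : List (Int × Int)), Dom_adjusted_control_point_list control_points adjust → Spec_adjusted_control_point_list control_points adjust (adjusted_control_point_list control_points adjust)

-- ===== LEMMAS AND PROOFS =====

-- common characterisation: pointwise sum while adjustments last, then plain flattening
def pvComb : List (Int × Int) → List (Int × Int) → List Int
  | [], _ => []
  | cp :: cps, [] => cp.1 :: cp.2 :: pvComb cps []
  | cp :: cps, a :: adj => (cp.1 + a.1) :: (cp.2 + a.2) :: pvComb cps adj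

theorem pvComb_nil (cps : List (Int × Int)) :
    pvComb cps [] = cps.flatMap (fun cp => [cp.1, cp.2]) := by
  induction cps with
  | nil => rfl
  | cons cp cps ih => simp [pvComb, ih]

theorem pvComb_take (cps adj : List (Int × Int)) :
    pvComb cps (adj.take cps.length) = pvComb cps adj := by
  induction cps generalizing adj with
  | nil => cases adj <;> rfl
  | cons cp cps ih =>
    cases adj with
    | nil => rfl
    | cons a adj => simp [pvComb, ih]

theorem portA_aux (cps : List (Int × Int)) (adjust : List (Int × Int)) :
    ∀ (k : Nat) (acc : List Int),
      (PySem.List.enumerate cps (k : Int)).foldl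
        (fun l p =>
          if (adjust.length : Int) ≤ p.1 then
            (l ++ [p.2.1]) ++ [p.2.2]
          else
            (l ++ [p.2.1 + (PySem.List.pyGetD adjust p.1 (0, 0)).1]) ++
              [p.2.2 + (PySem.List.pyGetD adjust p.1 (0, 0)).2]) acc
      = acc ++ pvComb cps (adjust.drop k) := by
  induction cps with
  | nil => intro k acc; simp only [PySem.List.enumerate_nil, List.foldl_nil, pvComb, List.append_nil]
  | cons cp cps ih =>
    intro k acc
    rw [PySem.List.enumerate_cons]
    simp only [List.foldl_cons]
    have hk1 : ((k : Int) + 1) = ((k + 1 : Nat) : Int) := by push_cast; ring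
    by_cases h : adjust.length ≤ k
    · have hcond : ((adjust.length : Int) ≤ (k : Int)) := by exact_mod_cast h
      rw [if_pos hcond, hk1, ih]
      have h0 : adjust.drop k = [] := List.drop_eq_nil_of_le h
      have h1 : adjust.drop (k + 1) = [] := List.drop_eq_nil_of_le (by omega)
      simp [h0, h1, pvComb]
    · have hcond : ¬ ((adjust.length : Int) ≤ (k : Int)) := by exact_mod_cast h
      have hklt : k < adjust.length := by omega
      rw [if_neg hcond, hk1, ih]
      have hget : PySem.List.pyGetD adjust (k : Int) ((0 : Int), (0 : Int)) = adjust[k] := by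
        rw [PySem.List.pyGetD_natCast]
        exact List.getD_eq_getElem _ _ hklt
      have hdrop : adjust.drop k = adjust[k] :: adjust.drop (k + 1) :=
        List.drop_eq_getElem_cons hklt
      rw [hget, hdrop]
      simp only [pvComb, List.append_assoc, List.cons_append, List.nil_append]

theorem portB_aux (adj : List (Int × Int)) :
    ∀ (cps : List (Int × Int)) (k : Nat) (pre : List Int),
      pre.length = 2 * k → adj.length ≤ cps.length →
      (PySem.List.enumerate adj (k : Int)).foldl
        (fun f p =>
          let f1 := PySem.List.pySetD f (2 * p.1) (PySem.List.pyGetD f (2 * p.1) 0 + p.2.1)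
          PySem.List.pySetD f1 (2 * p.1 + 1) (PySem.List.pyGetD f1 (2 * p.1 + 1) 0 + p.2.2))
        (pre ++ cps.flatMap (fun cp => [cp.1, cp.2]))
      = pre ++ pvComb cps adj := by
  induction adj with
  | nil => intro cps k pre _ _; simp [PySem.List.enumerate_nil, pvComb_nil]
  | cons a adj ih =>
    intro cps k pre hpre hlen
    cases cps with
    | nil => simp at hlen
    | cons cp cps =>
      rw [PySem.List.enumerate_cons]
      simp only [List.foldl_cons]
      have h2k : (2 : Int) * (k : Int) = ((2 * k : Nat) : Int) := by push_cast; ring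
      have h2k1 : ((2 * k : Nat) : Int) + 1 = ((2 * k + 1 : Nat) : Int) := by push_cast; ring
      have hflat : (cp :: cps).flatMap (fun cp => [cp.1, cp.2])
          = cp.1 :: cp.2 :: cps.flatMap (fun cp => [cp.1, cp.2]) := by simp
      have hget1 : (pre ++ cp.1 :: cp.2 :: cps.flatMap (fun cp => [cp.1, cp.2])).getD (2 * k) 0 = cp.1 := by
        rw [List.getD_eq_getElem?_getD, List.getElem?_append_right (by omega)]
        simp [hpre]
      have hset1 : (pre ++ cp.1 :: cp.2 :: cps.flatMap (fun cp => [cp.1, cp.2])).set (2 * k) (cp.1 + a.1)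
          = pre ++ (cp.1 + a.1) :: cp.2 :: cps.flatMap (fun cp => [cp.1, cp.2]) := by
        rw [List.set_append_right _ _ (by omega)]
        simp [hpre]
      have hget2 : (pre ++ (cp.1 + a.1) :: cp.2 :: cps.flatMap (fun cp => [cp.1, cp.2])).getD (2 * k + 1) 0 = cp.2 := by
        rw [List.getD_eq_getElem?_getD, List.getElem?_append_right (by omega)]
        simp [hpre]
      have hset2 : (pre ++ (cp.1 + a.1) :: cp.2 :: cps.flatMap (fun cp => [cp.1, cp.2])).set (2 * k + 1) (cp.2 + a.2)
          = pre ++ (cp.1 + a.1) :: (cp.2 + a.2) :: cps.flatMap (fun cp => [cp.1, cp.2]) := by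
        rw [List.set_append_right _ _ (by omega)]
        simp [hpre]
      simp only [hflat, h2k, h2k1, PySem.List.pySetD_natCast, PySem.List.pyGetD_natCast]
      rw [hget1, hset1, hget2, hset2]
      have hk1 : ((k : Int) + 1) = ((k + 1 : Nat) : Int) := by push_cast; ring
      have hpre' : (pre ++ [cp.1 + a.1, cp.2 + a.2]).length = 2 * (k + 1) := by
        simp [hpre]; omega
      have := ih cps (k + 1) (pre ++ [cp.1 + a.1, cp.2 + a.2]) hpre' (by simpa using Nat.le_of_succ_le_succ hlen)
      simp only [List.append_assoc, List.cons_append, List.nil_append] at this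
      rw [hk1, this]
      simp [pvComb]

-- ===== VERDICT (by name: the statement is the Claim_ definition above) =====
theorem adjusted_control_point_list_spec : Claim_equal_adjusted_control_point_list := by
  intro cps adjust _
  unfold Spec_adjusted_control_point_list adjusted_control_point_list adjusted_control_point_list_alt
  have hA := portA_aux cps adjust 0 []
  simp only [Int.natCast_zero] at hA
  rw [hA, List.drop_zero]
  have hslice : PySem.List.slice adjust none (some (cps.length : Int)) = adjust.take cps.length :=
    PySem.List.slice_to_natCast _ _
  rw [hslice]
  have hB := portB_aux (adjust.take cps.length) cps 0 [] (by simp) (by simp)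
  simp only [Int.natCast_zero, List.nil_append] at hB
  rw [hB, pvComb_take]
  simp
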